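-- pv_equiv track=rewrite | github.com/miliar/Code_Jam_Webscraper | solutions_python/Problem_155/1983.py | get_data_out_from_structured_data_in
-- ===== SOURCE A (Python) =====
-- def get_data_out_from_structured_data_in(structured_data):
--     res = []
--     for case in structured_data:
--         actual_nbr = case[0]
--         case_solution = 0
--         j = 1
--         while j < len(case):
--             if j > actual_nbr:
--                 case_solution += j - actual_nbr
--                 actual_nbr += j - actual_nbr
--             actual_nbr += case[j]
--             j += 1
--         res.append(case_solution)
--     return res
-- ===== SOURCE B (Python) =====
-- def get_data_out_from_structured_data_in(structured_data):
--     def deficit(case):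
--         prefix = case[0]
--         best = 0
--         for j in range(1, len(case)):
--             best = max(best, j - prefix)
--             prefix += case[j]
--         return best
--     return [deficit(case) for case in structured_data]
-- ===== Notes on version B (the rewrite author's own statement) =====
-- stated objective: simpler
-- what changed: Replaces A's self-correcting accumulator with conditional top-ups by a running prefix sum and a single max-deficit scan (best = max over j of j - prefix_j, floored at 0), mapped over the cases.
import Mathlib
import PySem

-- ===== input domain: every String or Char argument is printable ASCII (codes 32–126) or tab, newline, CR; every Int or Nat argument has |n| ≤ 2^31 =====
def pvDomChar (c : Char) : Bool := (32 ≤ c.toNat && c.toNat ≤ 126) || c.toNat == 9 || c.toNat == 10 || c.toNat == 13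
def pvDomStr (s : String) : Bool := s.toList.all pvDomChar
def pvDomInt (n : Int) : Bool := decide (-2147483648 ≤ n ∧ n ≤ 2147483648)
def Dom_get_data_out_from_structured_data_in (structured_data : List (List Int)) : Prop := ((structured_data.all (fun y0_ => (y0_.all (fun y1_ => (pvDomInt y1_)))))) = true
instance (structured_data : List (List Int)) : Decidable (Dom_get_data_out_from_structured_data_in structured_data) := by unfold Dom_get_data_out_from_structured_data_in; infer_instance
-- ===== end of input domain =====

-- B replaces A's self-correcting accumulator (conditional top-ups) with a running prefix sum
-- plus a max-deficit scan; objective: simpler.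

-- ===== PORT A =====
-- while-loop body of A: j runs over range(1, len(case)); state = (actual_nbr, case_solution)
def pvStepA (case : List Int) (st : Int × Int) (j : Int) : Int × Int :=
  let actual := st.1
  let sol := st.2
  let sol := if j > actual then sol + (j - actual) else sol
  let actual := if j > actual then actual + (j - actual) else actual
  (actual + PySem.List.pyGetD case j 0, sol)   -- case[j] is always in range here; Pre_ rules out case = []

def get_data_out_from_structured_data_in (structured_data : List (List Int)) : List Int :=
  structured_data.foldl (fun res case =>
    res ++ [((PySem.List.pyRange 1 case.length 1).foldl (pvStepA case)
               (PySem.List.pyGetD case 0 0, 0)).2]) []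

-- ===== PORT B =====
-- inner-loop body of B: state = (prefix, best)
def pvStepB (case : List Int) (st : Int × Int) (j : Int) : Int × Int :=
  (st.1 + PySem.List.pyGetD case j 0, max st.2 (j - st.1))

def pvDeficit (case : List Int) : Int :=
  ((PySem.List.pyRange 1 case.length 1).foldl (pvStepB case) (PySem.List.pyGetD case 0 0, 0)).2

def get_data_out_from_structured_data_in_alt (structured_data : List (List Int)) : List Int :=
  structured_data.map pvDeficit

-- ===== PRECONDITION & SPEC =====
-- Pre_ excludes inputs containing an empty case: there A raises IndexError on case[0] (B too).
def Pre_get_data_out_from_structured_data_in (structured_data : List (List Int)) : Prop :=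
  ∀ case ∈ structured_data, case ≠ []
instance (structured_data : List (List Int)) : Decidable (Pre_get_data_out_from_structured_data_in structured_data) := by
  unfold Pre_get_data_out_from_structured_data_in; infer_instance
def pvWitness_get_data_out_from_structured_data_in : List (List Int) := [[1, 2], [3], [-1, 0, 4]]

def Spec_get_data_out_from_structured_data_in (structured_data : List (List Int)) (out : List Int) : Prop := out = get_data_out_from_structured_data_in_alt structured_data
instance (structured_data : List (List Int)) (out : List Int) : Decidable (Spec_get_data_out_from_structured_data_in structured_data out) := by unfold Spec_get_data_out_from_structured_data_in; infer_instance

-- ===== CLAIM (what is proved, stated in full; the proofs are below) =====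
def Claim_equal_get_data_out_from_structured_data_in : Prop := ∀ (structured_data : List (List Int)), Dom_get_data_out_from_structured_data_in structured_data → Pre_get_data_out_from_structured_data_in structured_data → Spec_get_data_out_from_structured_data_in structured_data (get_data_out_from_structured_data_in structured_data)

-- ===== LEMMAS AND PROOFS =====

-- Invariant: A's state is B's state with the accumulated deficit folded into the first component.
theorem pvFold_inv (case : List Int) (js : List Int) (p s : Int) :
    js.foldl (pvStepA case) (p + s, s)
      = ((js.foldl (pvStepB case) (p, s)).1 + (js.foldl (pvStepB case) (p, s)).2,
         (js.foldl (pvStepB case) (p, s)).2) := by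
  induction js generalizing p s with
  | nil => simp
  | cons j js ih =>
    simp only [List.foldl_cons]
    have hA : pvStepA case (p + s, s) j
        = ((pvStepB case (p, s) j).1 + (pvStepB case (p, s) j).2, (pvStepB case (p, s) j).2) := by
      simp only [pvStepA, pvStepB]
      by_cases h : j > p + s
      · have : max s (j - p) = j - p := by omega
        simp [h, this]
        omega
      · have : max s (j - p) = s := by omega
        simp [h, this]; ring
    rw [hA, ih]

theorem pvCase_eq (case : List Int) :
    ((PySem.List.pyRange 1 case.length 1).foldl (pvStepA case)
       (PySem.List.pyGetD case 0 0, 0)).2 = pvDeficit case := by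
  unfold pvDeficit
  have h := pvFold_inv case (PySem.List.pyRange 1 case.length 1) (PySem.List.pyGetD case 0 0) 0
  rw [show PySem.List.pyGetD case 0 0 + 0 = PySem.List.pyGetD case 0 0 by ring] at h
  rw [h]

theorem pvFoldAppend (l : List (List Int)) (acc : List Int) :
    l.foldl (fun res case =>
      res ++ [((PySem.List.pyRange 1 case.length 1).foldl (pvStepA case)
                 (PySem.List.pyGetD case 0 0, 0)).2]) acc
      = acc ++ l.map pvDeficit := by
  induction l generalizing acc with
  | nil => simp
  | cons c l ih =>
    simp only [List.foldl_cons]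
    rw [ih, pvCase_eq]
    simp

-- ===== VERDICT (by name: the statement is the Claim_ definition above) =====
theorem get_data_out_from_structured_data_in_spec : Claim_equal_get_data_out_from_structured_data_in := by
  intro structured_data _ _
  unfold Spec_get_data_out_from_structured_data_in
  unfold get_data_out_from_structured_data_in get_data_out_from_structured_data_in_alt
  rw [pvFoldAppend]
  simp
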